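-- pv_equiv track=rewrite | github.com/ericksamera/analyze-bismark-summaries | src/_PCoA.py | _generate_truth_list
-- ===== SOURCE A (Python) =====
-- def _generate_truth_list(_offset_dict: dict, max_value: int) -> list:
--     """
--     """
--     if not _offset_dict['start'] > 1: truth_list = []
--     else: truth_list = [False]*_offset_dict['start']
--     for i in range(_offset_dict['end']-_offset_dict['start']):
--         truth_list += [True]
--     while len(truth_list) < max_value:
--         truth_list += [False]
--     return(truth_list)
-- ===== SOURCE B (Python) =====
-- def _generate_truth_list(_offset_dict: dict, max_value: int) -> list:
--     start = _offset_dict['start']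
--     end = _offset_dict['end']
--     p = start if start > 1 else 0
--     tc = max(0, end - start)
--     n = max(p + tc, max_value)
--     return [p <= i < p + tc for i in range(n)]
-- ===== Notes on version B (the rewrite author's own statement) =====
-- stated objective: simpler
-- what changed: A builds the list in three phases (replicated False prefix, a loop appending True once per range step, a while loop padding False up to max_value); B computes the prefix length p, the True-run length tc and the total length n = max(p+tc, max_value) and emits the whole list as one comprehension deciding each position by boundary comparison.
import Mathlib
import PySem

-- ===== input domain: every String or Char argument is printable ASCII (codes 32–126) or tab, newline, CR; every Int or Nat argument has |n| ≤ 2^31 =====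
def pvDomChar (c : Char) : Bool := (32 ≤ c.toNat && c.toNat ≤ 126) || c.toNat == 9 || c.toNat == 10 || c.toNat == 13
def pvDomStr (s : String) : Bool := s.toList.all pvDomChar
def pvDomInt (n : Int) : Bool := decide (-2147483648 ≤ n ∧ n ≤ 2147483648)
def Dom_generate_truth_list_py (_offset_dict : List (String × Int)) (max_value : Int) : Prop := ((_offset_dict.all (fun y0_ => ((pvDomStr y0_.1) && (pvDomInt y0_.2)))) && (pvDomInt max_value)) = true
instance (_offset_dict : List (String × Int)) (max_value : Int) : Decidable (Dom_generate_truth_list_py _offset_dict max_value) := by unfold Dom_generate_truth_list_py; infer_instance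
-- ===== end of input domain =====

-- B replaces A's three-phase build (False prefix, True append loop, while-pad) with one
-- boundary-comparison comprehension over a single range; alternative decomposition, not faster.
-- ===== PORT A =====
-- the `while len(truth_list) < max_value: truth_list += [False]` loop
def gtlPad (max_value : Int) (tl : List Bool) : List Bool :=
  if (tl.length : Int) < max_value then gtlPad max_value (tl ++ [false]) else tl
termination_by (max_value - tl.length).toNat
decreasing_by simp; omega

def generate_truth_list_py (_offset_dict : List (String × Int)) (max_value : Int) : List Bool :=
  -- dict lookups _offset_dict['start'] / ['end']; Pre_ guarantees the keys exist
  let start := (_offset_dict.lookup "start").getD 0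
  let stop := (_offset_dict.lookup "end").getD 0
  let truth_list := if ¬ (start > 1) then [] else List.replicate start.toNat false
  let truth_list := (PySem.List.pyRange 0 (stop - start) 1).foldl (fun acc _ => acc ++ [true]) truth_list
  gtlPad max_value truth_list

-- ===== PORT B =====
def generate_truth_list_py_alt (_offset_dict : List (String × Int)) (max_value : Int) : List Bool :=
  let start := (_offset_dict.lookup "start").getD 0
  let stop := (_offset_dict.lookup "end").getD 0
  let p := if start > 1 then start else 0
  let tc := max 0 (stop - start)
  let n := max (p + tc) max_value
  (PySem.List.pyRange 0 n 1).map (fun i => decide (p ≤ i) && decide (i < p + tc))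

-- ===== PRECONDITION & SPEC =====
-- A raises KeyError when 'start' or 'end' is missing; Pre_ requires both keys present.
def Pre_generate_truth_list_py (_offset_dict : List (String × Int)) (max_value : Int) : Prop :=
  (_offset_dict.lookup "start").isSome = true ∧ (_offset_dict.lookup "end").isSome = true
instance (_offset_dict : List (String × Int)) (max_value : Int) : Decidable (Pre_generate_truth_list_py _offset_dict max_value) := by unfold Pre_generate_truth_list_py; infer_instance

def pvWitness_generate_truth_list_py : (List (String × Int)) × Int := ([("start", 2), ("end", 5)], 7)

def Spec_generate_truth_list_py (_offset_dict : List (String × Int)) (max_value : Int) (out : List Bool) : Prop := out = generate_truth_list_py_alt _offset_dict max_value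
instance (_offset_dict : List (String × Int)) (max_value : Int) (out : List Bool) : Decidable (Spec_generate_truth_list_py _offset_dict max_value out) := by unfold Spec_generate_truth_list_py; infer_instance

-- ===== CLAIM (what is proved, stated in full; the proofs are below) =====
def Claim_equal_generate_truth_list_py : Prop := ∀ (_offset_dict : List (String × Int)) (max_value : Int), Dom_generate_truth_list_py _offset_dict max_value → Pre_generate_truth_list_py _offset_dict max_value → Spec_generate_truth_list_py _offset_dict max_value (generate_truth_list_py _offset_dict max_value)

-- ===== LEMMAS AND PROOFS =====

-- appending [true] once per range element = appending a replicate block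
theorem foldl_append_true (l : List Int) (tl : List Bool) :
    l.foldl (fun acc _ => acc ++ [true]) tl = tl ++ List.replicate l.length true := by
  induction l generalizing tl with
  | nil => simp
  | cons x xs ih =>
      simp only [List.foldl_cons, List.length_cons, ih, List.replicate_succ]
      simp [List.append_assoc]

-- the pad loop appends exactly the missing number of False
theorem gtlPad_eq (m : Int) (tl : List Bool) :
    gtlPad m tl = tl ++ List.replicate (m - tl.length).toNat false := by
  fun_induction gtlPad m tl with
  | case1 tl h ih =>
      have h2 : (m - ((tl ++ [false]).length : Int)).toNat + 1 = (m - tl.length).toNat := by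
        simp; omega
      rw [ih, List.append_assoc, ← h2]
      simp [List.replicate_succ]
  | case2 tl h =>
      have : (m - (tl.length : Int)).toNat = 0 := by omega
      simp [this]

-- map of a constant-valued function over a range segment
theorem map_const_pyRange (a b : Int) (f : Int → Bool) (c : Bool)
    (h : ∀ x, a ≤ x → x < b → f x = c) :
    (PySem.List.pyRange a b 1).map f = List.replicate (b - a).toNat c := by
  have h1 : (PySem.List.pyRange a b 1).map f = (PySem.List.pyRange a b 1).map (fun _ => c) := by
    apply List.map_congr_left
    intro x hx
    rw [PySem.List.mem_pyRange_one] at hx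
    exact h x hx.1 hx.2
  rw [h1, List.map_const', PySem.List.length_pyRange_one]

-- the whole computation, generalized over the two looked-up values
theorem gtl_key (s e m : Int) :
    gtlPad m ((PySem.List.pyRange 0 (e - s) 1).foldl (fun acc _ => acc ++ [true])
      (if ¬ (s > 1) then [] else List.replicate s.toNat false))
    = (PySem.List.pyRange 0 (max ((if s > 1 then s else 0) + max 0 (e - s)) m) 1).map
        (fun i => decide ((if s > 1 then s else 0) ≤ i) && decide (i < (if s > 1 then s else 0) + max 0 (e - s))) := by
  set p : Int := if s > 1 then s else 0 with hp
  set tc : Int := max 0 (e - s) with htc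
  set n : Int := max (p + tc) m with hn
  have hp0 : 0 ≤ p := by rw [hp]; split <;> omega
  have htc0 : 0 ≤ tc := by rw [htc]; omega
  have hpn : p + tc ≤ n := by rw [hn]; omega
  -- A side to canonical form
  rw [foldl_append_true, gtlPad_eq, PySem.List.length_pyRange_one]
  have htl0 : (if ¬ (s > 1) then ([] : List Bool) else List.replicate s.toNat false)
      = List.replicate p.toNat false := by
    rw [hp]; split_ifs with h1 h2 <;> simp_all <;> omega
  rw [htl0]
  have htcn : (e - s - 0).toNat = tc.toNat := by rw [htc]; omega
  rw [htcn]
  -- B side: split the range at p and p+tc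
  rw [PySem.List.pyRange_one_append 0 p n hp0 (by omega),
      PySem.List.pyRange_one_append p (p + tc) n (by omega) hpn,
      List.map_append, List.map_append]
  rw [map_const_pyRange 0 p _ false (by intro x h1 h2; simp; omega),
      map_const_pyRange p (p + tc) _ true (by intro x h1 h2; simp [h1, h2]),
      map_const_pyRange (p + tc) n _ false (by intro x h1 h2; simp; omega)]
  have e1 : (p - 0).toNat = p.toNat := by omega
  have e2 : (p + tc - p).toNat = tc.toNat := by omega
  have e3 : (m - (((List.replicate p.toNat false ++ List.replicate tc.toNat true).length : Nat) : Int)).toNat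
      = (n - (p + tc)).toNat := by simp; omega
  rw [e1, e2, e3, List.append_assoc]

-- ===== VERDICT (by name: the statement is the Claim_ definition above) =====
theorem generate_truth_list_py_spec : Claim_equal_generate_truth_list_py := by
  intro d m _ _
  exact gtl_key ((d.lookup "start").getD 0) ((d.lookup "end").getD 0) m
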